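-- pv_equiv track=rewrite | github.com/scaleapi/SWE-bench_Pro-os | Setup Scripts/submodules_debugging/scan_all_submodules.py | parse_gitmodules
-- ===== SOURCE A (Python) =====
-- def parse_gitmodules(content: str) -> list[dict]:
--     """Parse .gitmodules content into a list of submodule definitions."""
--     submodules = []
--     current = {}
--
--     for line in content.split("\n"):
--         line = line.strip()
--         if line.startswith("[submodule"):
--             if current:
--                 submodules.append(current)
--             name = line.split('"')[1] if '"' in line else ""
--             current = {"name": name}
--         elif "=" in line and current:
--             key, value = line.split("=", 1)
--             current[key.strip()] = value.strip()
--
--     if current: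
--         submodules.append(current)
--
--     return submodules
-- ===== SOURCE B (Python) =====
-- def _block_dict(header, body):
--     d = {"name": header.split('"')[1] if '"' in header else ""}
--     for ln in body:
--         if "=" in ln:
--             key, value = ln.split("=", 1)
--             d[key.strip()] = value.strip()
--     return d
--
--
-- def _parse_blocks(lines):
--     # lines is empty or starts with a '[submodule' header line
--     if not lines:
--         return []
--     k = 1
--     while k < len(lines) and not lines[k].startswith("[submodule"):
--         k += 1
--     return [_block_dict(lines[0], lines[1:k])] + _parse_blocks(lines[k:])
--
--
-- def parse_gitmodules(content: str) -> list[dict]: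
--     """Parse .gitmodules content into a list of submodule definitions."""
--     lines = [ln.strip() for ln in content.split("\n")]
--     i = 0
--     while i < len(lines) and not lines[i].startswith("[submodule"):
--         i += 1
--     return _parse_blocks(lines[i:])
-- ===== Notes on version B (the rewrite author's own statement) =====
-- stated objective: alternative
-- what changed: Replaces A's single stateful accumulate-and-flush loop (current dict plus end-of-loop flush) with a segment-then-map decomposition: skip lines before the first submodule header, then recursively cut the line list into header-delimited blocks and build each block's dict with a small helper.
import Mathlib
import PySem

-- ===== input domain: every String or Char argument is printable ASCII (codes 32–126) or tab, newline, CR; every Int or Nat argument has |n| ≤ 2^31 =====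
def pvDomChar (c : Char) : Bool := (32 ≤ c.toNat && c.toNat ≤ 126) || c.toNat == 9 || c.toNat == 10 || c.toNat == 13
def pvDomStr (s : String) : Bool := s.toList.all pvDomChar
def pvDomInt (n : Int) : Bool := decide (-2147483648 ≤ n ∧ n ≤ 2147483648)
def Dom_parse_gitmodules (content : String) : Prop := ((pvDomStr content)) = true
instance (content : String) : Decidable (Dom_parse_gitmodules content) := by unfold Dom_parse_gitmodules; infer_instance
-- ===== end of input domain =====

-- B replaces A's accumulate-and-flush stateful loop by a segment-then-map decomposition
-- (skip the preamble, then one recursive pass producing a dict per header block); objective: alternative, same cost.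

-- shared leaf helpers (identical expressions in both Pythons): header test,
-- name extraction from a header line, and the key/value insertion of a 'k = v' line
def pvHeaderB (line : String) : Bool := PySem.Str.startswith line "[submodule"

def pvNameOf (line : String) : String :=
  if PySem.Str.isIn "\"" line = true then ((PySem.Str.split? line "\"").getD []).getD 1 "" else ""
  -- line.split('"')[1]: when '"' ∈ line the split has ≥ 2 parts, so the index is always in range

def pvKvInsert (d : PySem.Dict String String) (line : String) : PySem.Dict String String :=
  let parts := (PySem.Str.splitMax? line "=" 1).getD []
  d.insert (PySem.Str.strip (parts.getD 0 "")) (PySem.Str.strip (parts.getD 1 ""))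
  -- line.split('=', 1): with '=' ∈ line it has exactly 2 parts, indices always in range

-- ===== PORT A =====
def pvAStepS (st : List (PySem.Dict String String) × PySem.Dict String String) (line : String) :
    List (PySem.Dict String String) × PySem.Dict String String :=
  if pvHeaderB line then
    (if st.2.items = [] then st.1 else st.1 ++ [st.2],
     PySem.Dict.ofList [("name", pvNameOf line)])
  else if PySem.Str.isIn "=" line = true ∧ st.2.items ≠ [] then
    (st.1, pvKvInsert st.2 line)
  else st

def parse_gitmodules (content : String) : List (List (String × String)) :=
  let r := ((PySem.Str.split? content "\n").getD []).foldl
    (fun st line0 => pvAStepS st (PySem.Str.strip line0)) ([], PySem.Dict.empty)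
  (if r.2.items = [] then r.1 else r.1 ++ [r.2]).map (fun d => d.items)

-- ===== PORT B =====
def pvBKv (d : PySem.Dict String String) (line : String) : PySem.Dict String String :=
  if PySem.Str.isIn "=" line = true then pvKvInsert d line else d

def pvBlockDict (header : String) (body : List String) : List (String × String) :=
  (body.foldl pvBKv (PySem.Dict.ofList [("name", pvNameOf header)])).items

def pvParseBlocks : List String → List (List (String × String))
  | [] => []
  | h :: rest =>
      pvBlockDict h (rest.takeWhile (fun ln => !pvHeaderB ln)) ::
        pvParseBlocks (rest.dropWhile (fun ln => !pvHeaderB ln))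
  termination_by l => l.length
  decreasing_by
    simpa [Nat.lt_succ_iff] using List.length_dropWhile_le (fun ln => !pvHeaderB ln) rest

def parse_gitmodules_alt (content : String) : List (List (String × String)) :=
  let lines := ((PySem.Str.split? content "\n").getD []).map PySem.Str.strip
  pvParseBlocks (lines.dropWhile (fun ln => !pvHeaderB ln))

-- ===== PRECONDITION & SPEC =====
def Spec_parse_gitmodules (content : String) (out : List (List (String × String))) : Prop := out = parse_gitmodules_alt content
instance (content : String) (out : List (List (String × String))) : Decidable (Spec_parse_gitmodules content out) := by unfold Spec_parse_gitmodules; infer_instance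

-- ===== CLAIM (what is proved, stated in full; the proofs are below) =====
def Claim_equal_parse_gitmodules : Prop := ∀ (content : String), Dom_parse_gitmodules content → Spec_parse_gitmodules content (parse_gitmodules content)

-- ===== LEMMAS AND PROOFS =====

theorem pv_insert_items_ne_nil (d : PySem.Dict String String) (k v : String) :
    (d.insert k v).items ≠ [] := by
  intro h
  have hc : (d.insert k v).contains k = true := PySem.Dict.contains_insert_self d k v
  have hk : k ∈ (d.insert k v).keys := (PySem.Dict.contains_iff_mem_keys _ _).mp hc
  simp [PySem.Dict.keys, h] at hk

theorem pv_kv_items_ne_nil (d : PySem.Dict String String) (line : String) :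
    (pvKvInsert d line).items ≠ [] := by
  unfold pvKvInsert
  exact pv_insert_items_ne_nil _ _ _

theorem pv_d0_items_ne_nil (n : String) :
    (PySem.Dict.ofList [("name", n)] : PySem.Dict String String).items ≠ [] := by
  simpa [PySem.Dict.ofList, PySem.Dict.update] using
    pv_insert_items_ne_nil PySem.Dict.empty "name" n

theorem pv_loop_inside (lines : List String)
    (subs : List (PySem.Dict String String)) (cur : PySem.Dict String String)
    (hcur : cur.items ≠ []) :
    (let r := lines.foldl pvAStepS (subs, cur)
     (if r.2.items = [] then r.1 else r.1 ++ [r.2]).map (fun d => d.items)) =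
      subs.map (fun d => d.items)
        ++ [((lines.takeWhile (fun ln => !pvHeaderB ln)).foldl pvBKv cur).items]
        ++ pvParseBlocks (lines.dropWhile (fun ln => !pvHeaderB ln)) := by
  induction lines generalizing subs cur with
  | nil => simp [hcur, pvParseBlocks]
  | cons ln rest ih =>
    by_cases hh : pvHeaderB ln = true
    · have hstep : pvAStepS (subs, cur) ln =
          (subs ++ [cur], PySem.Dict.ofList [("name", pvNameOf ln)]) := by
        simp [pvAStepS, hh, hcur]
      rw [List.foldl_cons, hstep, ih _ _ (pv_d0_items_ne_nil _)]
      simp [pvParseBlocks, hh, pvBlockDict]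
    · have hb : (!pvHeaderB ln) = true := by simp [hh]
      by_cases he : PySem.Str.isIn "=" ln = true
      · have he' : PySem.Chars.isIn ['='] ln.toList = true := by simpa using he
        have hstep : pvAStepS (subs, cur) ln = (subs, pvKvInsert cur ln) := by
          simp [pvAStepS, hh, he', hcur]
        rw [List.foldl_cons, hstep, ih _ _ (pv_kv_items_ne_nil _ _)]
        simp [hb, pvBKv, he']
      · have he' : PySem.Chars.isIn ['='] ln.toList = false := by
          simpa using he
        have hstep : pvAStepS (subs, cur) ln = (subs, cur) := by
          simp [pvAStepS, hh, he']
        rw [List.foldl_cons, hstep, ih _ _ hcur]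
        simp [hb, pvBKv, he']

theorem pv_whole (lines : List String) :
    (let r := lines.foldl pvAStepS ([], PySem.Dict.empty)
     (if r.2.items = [] then r.1 else r.1 ++ [r.2]).map (fun d => d.items)) =
      pvParseBlocks (lines.dropWhile (fun ln => !pvHeaderB ln)) := by
  induction lines with
  | nil => simp [pvParseBlocks, PySem.Dict.empty]
  | cons ln rest ih =>
    by_cases hh : pvHeaderB ln = true
    · have hstep : pvAStepS ([], PySem.Dict.empty) ln =
          ([], PySem.Dict.ofList [("name", pvNameOf ln)]) := by
        simp [pvAStepS, hh, PySem.Dict.empty]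
      rw [List.foldl_cons, hstep]
      rw [pv_loop_inside _ _ _ (pv_d0_items_ne_nil _)]
      simp [pvParseBlocks, hh, pvBlockDict]
    · have hstep : pvAStepS ([], PySem.Dict.empty) ln = ([], PySem.Dict.empty) := by
        simp [pvAStepS, hh, PySem.Dict.empty]
      rw [List.foldl_cons, hstep]
      simpa [hh] using ih

-- ===== VERDICT (by name: the statement is the Claim_ definition above) =====
theorem parse_gitmodules_spec : Claim_equal_parse_gitmodules := by
  intro content _
  show parse_gitmodules content = parse_gitmodules_alt content
  unfold parse_gitmodules parse_gitmodules_alt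
  simp only [← List.foldl_map (f := PySem.Str.strip) (g := pvAStepS)]
  exact pv_whole _
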